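-- pv_equiv track=rewrite | github.com/Matteo-Candi/Master-Thesis | code/formatter.py | reindent_code
-- ===== SOURCE A (Python) =====
-- def reindent_code(code: str) -> str:
--     indet_count: int = 0
--     final_code: str = ''
--
--     for line in code.split(' NEW_LINE '):
--         if 'INDENT' in line:
--             indet_count += line.count('INDENT')
--             line = line.replace('INDENT ', '')
--             line = '    ' * indet_count + line
--         elif 'DEDENT' in line:
--             indet_count -= line.count('DEDENT')
--             line = line.replace('DEDENT ', '')
--             line = '    ' * indet_count + line
--         else:
--             line = '    ' * indet_count + line
--
--         final_code += line + '\n'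
--
--     return final_code
-- ===== SOURCE B (Python) =====
-- def reindent_code(code: str) -> str:
--     lines = code.split(' NEW_LINE ')
--
--     def seg(lo, hi):
--         # (total indent delta of the segment,
--         #  [(indent level relative to the segment's start, cleaned line)])
--         if hi - lo == 1:
--             line = lines[lo]
--             if 'INDENT' in line:
--                 d = line.count('INDENT')
--                 line = line.replace('INDENT ', '')
--             elif 'DEDENT' in line:
--                 d = -line.count('DEDENT')
--                 line = line.replace('DEDENT ', '')
--             else:
--                 d = 0
--             return d, [(d, line)]
--         mid = (lo + hi) // 2
--         d1, r1 = seg(lo, mid)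
--         d2, r2 = seg(mid, hi)
--         return d1 + d2, r1 + [(d1 + lv, text) for lv, text in r2]
--
--     _, rows = seg(0, len(lines))
--     return ''.join('    ' * lv + text + '\n' for lv, text in rows)
-- ===== Notes on version B (the rewrite author's own statement) =====
-- stated objective: alternative
-- what changed: Replaces A's left-to-right loop mutating a running indent counter with a divide-and-conquer: each half-segment is summarised as (total delta, lines with segment-relative levels) and halves are merged by shifting the right half's levels by the left half's delta, then everything is rendered at once.
import Mathlib
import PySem

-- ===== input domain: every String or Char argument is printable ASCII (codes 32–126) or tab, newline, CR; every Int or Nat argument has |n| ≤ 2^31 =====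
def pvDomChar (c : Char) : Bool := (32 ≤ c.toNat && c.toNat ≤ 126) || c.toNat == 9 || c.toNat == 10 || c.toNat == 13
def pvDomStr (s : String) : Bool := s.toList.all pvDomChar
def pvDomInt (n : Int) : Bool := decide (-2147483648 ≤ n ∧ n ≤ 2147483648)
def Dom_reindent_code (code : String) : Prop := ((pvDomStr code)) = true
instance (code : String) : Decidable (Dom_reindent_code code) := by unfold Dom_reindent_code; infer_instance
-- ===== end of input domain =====

-- B replaces A's fused left-to-right loop (running counter) by a divide-and-conquer that
-- summarises each half as (delta, relative-level rows) and merges by shifting (objective: alternative).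

-- shared literal tokens
def pvIND : List Char := "INDENT".toList
def pvINDSP : List Char := "INDENT ".toList
def pvDED : List Char := "DEDENT".toList
def pvDEDSP : List Char := "DEDENT ".toList
def pvNL : List Char := " NEW_LINE ".toList
-- '    ' * n  (Python str*int; empty for n ≤ 0) — exact
def pvSp4Mul (n : Int) : List Char := (List.replicate n.toNat "    ".toList).flatten

-- ===== PORT A =====
def pvAStep (st : Int × List Char) (line : List Char) : Int × List Char :=
  if PySem.Chars.isIn pvIND line then
    let cnt := st.1 + (PySem.Chars.count line pvIND : Int)
    let line' := PySem.Chars.replace line pvINDSP []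
    (cnt, st.2 ++ (pvSp4Mul cnt ++ line' ++ ['\n']))
  else if PySem.Chars.isIn pvDED line then
    let cnt := st.1 - (PySem.Chars.count line pvDED : Int)
    let line' := PySem.Chars.replace line pvDEDSP []
    (cnt, st.2 ++ (pvSp4Mul cnt ++ line' ++ ['\n']))
  else
    (st.1, st.2 ++ (pvSp4Mul st.1 ++ line ++ ['\n']))

def reindent_code (code : String) : String :=
  String.ofList ((PySem.Chars.splitOn code.toList pvNL).foldl pvAStep (0, [])).2

-- ===== PORT B =====
-- the leaf case of Source B's seg (the branch on one line)
def pvDeltaClean (line : List Char) : Int × List Char :=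
  if PySem.Chars.isIn pvIND line then
    ((PySem.Chars.count line pvIND : Int), PySem.Chars.replace line pvINDSP [])
  else if PySem.Chars.isIn pvDED line then
    (-(PySem.Chars.count line pvDED : Int), PySem.Chars.replace line pvDEDSP [])
  else (0, line)

-- Source B's seg: on a segment of lines, return (total delta, rows with segment-relative levels);
-- halves are merged by shifting the right half's levels by the left half's delta
def pvSeg : List (List Char) → Int × List (Int × List Char)
  | [] => (0, [])
  | [l] =>
    let dc := pvDeltaClean l
    (dc.1, [(dc.1, dc.2)])
  | l₁ :: l₂ :: rest =>
    let ls := l₁ :: l₂ :: rest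
    let k := ls.length / 2
    let s1 := pvSeg (ls.take k)
    let s2 := pvSeg (ls.drop k)
    (s1.1 + s2.1, s1.2 ++ s2.2.map (fun p => (s1.1 + p.1, p.2)))
termination_by ls => ls.length
decreasing_by
  · simp only [List.length_take]; simp [List.length]; omega
  · simp only [List.length_drop]; simp [List.length]; omega

def reindent_code_alt (code : String) : String :=
  let rows := (pvSeg (PySem.Chars.splitOn code.toList pvNL)).2
  String.ofList (PySem.Chars.join [] (rows.map (fun p => pvSp4Mul p.1 ++ p.2 ++ ['\n'])))

-- ===== PRECONDITION & SPEC =====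
def Spec_reindent_code (code : String) (out : String) : Prop := out = reindent_code_alt code
instance (code : String) (out : String) : Decidable (Spec_reindent_code code out) := by unfold Spec_reindent_code; infer_instance

-- ===== CLAIM =====
def Claim_equal_reindent_code : Prop := ∀ (code : String), Dom_reindent_code code → Spec_reindent_code code (reindent_code code)

-- ===== LEMMAS AND PROOFS =====

-- spec skeleton: levels as forward prefix sums
def pvRows (t : Int) : List (List Char) → List (Int × List Char)
  | [] => []
  | l :: ls => (t + (pvDeltaClean l).1, (pvDeltaClean l).2) :: pvRows (t + (pvDeltaClean l).1) ls

def pvSumD (ls : List (List Char)) : Int := (ls.map (fun l => (pvDeltaClean l).1)).sum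

lemma pvSumD_append (xs ys : List (List Char)) : pvSumD (xs ++ ys) = pvSumD xs + pvSumD ys := by
  simp [pvSumD]

lemma pvRows_append (xs : List (List Char)) : ∀ (ys : List (List Char)) (t : Int),
    pvRows t (xs ++ ys) = pvRows t xs ++ pvRows (t + pvSumD xs) ys := by
  induction xs with
  | nil => intro ys t; simp [pvRows, pvSumD]
  | cons x xs ih =>
    intro ys t
    simp only [List.cons_append, pvRows, ih, pvSumD, List.map_cons, List.sum_cons]
    ring_nf

lemma pvRows_shift (ls : List (List Char)) : ∀ (a t : Int),
    pvRows (a + t) ls = (pvRows t ls).map (fun p => (a + p.1, p.2)) := by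
  induction ls with
  | nil => intro a t; simp [pvRows]
  | cons l ls ih =>
    intro a t
    simp only [pvRows, List.map_cons, add_assoc, ih]

lemma pvSeg_eq_aux : ∀ (n : Nat) (ls : List (List Char)), ls.length ≤ n →
    pvSeg ls = (pvSumD ls, pvRows 0 ls) := by
  intro n
  induction n with
  | zero =>
    intro ls h
    match ls with
    | [] => simp [pvSeg, pvSumD, pvRows]
  | succ n ih =>
    intro ls h
    match ls with
    | [] => simp [pvSeg, pvSumD, pvRows]
    | [l] => simp [pvSeg, pvSumD, pvRows]
    | l₁ :: l₂ :: rest =>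
      rw [pvSeg]
      have hlen : (l₁ :: l₂ :: rest).length = rest.length + 2 := by simp
      have htk : ((l₁ :: l₂ :: rest).take ((l₁ :: l₂ :: rest).length / 2)).length ≤ n := by
        simp only [List.length_take, hlen]
        simp at h ⊢
        omega
      have hdr : ((l₁ :: l₂ :: rest).drop ((l₁ :: l₂ :: rest).length / 2)).length ≤ n := by
        simp only [List.length_drop, hlen]
        simp at h ⊢
        omega
      rw [ih _ htk, ih _ hdr]
      have hsplit : (l₁ :: l₂ :: rest) =
          (l₁ :: l₂ :: rest).take ((l₁ :: l₂ :: rest).length / 2) ++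
          (l₁ :: l₂ :: rest).drop ((l₁ :: l₂ :: rest).length / 2) := by
        simp
      dsimp only
      rw [Prod.mk.injEq]
      refine ⟨?_, ?_⟩
      · conv_rhs => rw [hsplit]
        rw [pvSumD_append]
      · conv_rhs => rw [hsplit]
        rw [pvRows_append]
        congr 1
        rw [show (0 : Int) + pvSumD ((l₁ :: l₂ :: rest).take ((l₁ :: l₂ :: rest).length / 2)) =
              pvSumD ((l₁ :: l₂ :: rest).take ((l₁ :: l₂ :: rest).length / 2)) + 0 by ring]
        rw [pvRows_shift]

lemma pvSeg_eq (ls : List (List Char)) : pvSeg ls = (pvSumD ls, pvRows 0 ls) :=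
  pvSeg_eq_aux ls.length ls le_rfl

lemma pvAStep_eq (st : Int × List Char) (line : List Char) :
    pvAStep st line =
      (st.1 + (pvDeltaClean line).1,
       st.2 ++ (pvSp4Mul (st.1 + (pvDeltaClean line).1) ++ (pvDeltaClean line).2 ++ ['\n'])) := by
  unfold pvAStep pvDeltaClean
  split_ifs <;> simp <;> ring_nf <;> try exact ⟨trivial, trivial⟩

lemma pvJoin_nil_cons (x : List Char) (xs : List (List Char)) :
    PySem.Chars.join [] (x :: xs) = x ++ PySem.Chars.join [] xs := by
  cases xs <;> simp [PySem.Chars.join, List.intercalate, List.intersperse]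

lemma pvFold_eq (lines : List (List Char)) : ∀ (cnt : Int) (acc : List Char),
    (lines.foldl pvAStep (cnt, acc)).2 =
      acc ++ PySem.Chars.join []
        ((pvRows cnt lines).map (fun p => pvSp4Mul p.1 ++ p.2 ++ ['\n'])) := by
  induction lines with
  | nil => intro cnt acc; simp [pvRows, PySem.Chars.join_nil]
  | cons l ls ih =>
    intro cnt acc
    simp only [List.foldl_cons, pvRows, List.map_cons, pvJoin_nil_cons, pvAStep_eq]
    rw [ih]
    simp [List.append_assoc]

-- ===== VERDICT =====
theorem reindent_code_spec : Claim_equal_reindent_code := by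
  intro code _
  unfold Spec_reindent_code reindent_code reindent_code_alt
  rw [pvFold_eq, pvSeg_eq]
  simp
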